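-- pv_equiv track=rewrite | github.com/imjinshuo/RulER | scripts/RQ3/utils.py | delete_code
-- ===== SOURCE A (Python) =====
-- def delete_code(code_lines, map):
--     this_code_lines = []
--     for line_id in range(len(code_lines)):
--         this_line = ''
--         for chr_id in range(len(code_lines[line_id])):
--             if [line_id, chr_id] in map:
--                 this_line += ' '
--             else:
--                 this_line += code_lines[line_id][chr_id]
--         this_code_lines.append(this_line)
--     return this_code_lines
-- ===== SOURCE B (Python) =====
-- def delete_code(code_lines, map):
--     # Index the blank coordinates once: line_id -> set of chr_ids.
--     idx = {}
--     for e in map: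
--         if len(e) == 2:
--             s = idx.get(e[0], set())
--             s.add(e[1])
--             idx[e[0]] = s
--     out = []
--     for i, line in enumerate(code_lines):
--         chars = list(line)
--         for c in idx.get(i, ()):
--             if 0 <= c < len(chars):
--                 chars[c] = ' '
--         out.append(''.join(chars))
--     return out
-- ===== Notes on version B (the rewrite author's own statement) =====
-- stated objective: faster
-- what changed: Instead of testing [line_id, chr_id] against the whole map for every character, B builds a dict index line_id -> set of chr_ids in one pass over map and then overwrites only the indexed in-range positions of each line.
import Mathlib
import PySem

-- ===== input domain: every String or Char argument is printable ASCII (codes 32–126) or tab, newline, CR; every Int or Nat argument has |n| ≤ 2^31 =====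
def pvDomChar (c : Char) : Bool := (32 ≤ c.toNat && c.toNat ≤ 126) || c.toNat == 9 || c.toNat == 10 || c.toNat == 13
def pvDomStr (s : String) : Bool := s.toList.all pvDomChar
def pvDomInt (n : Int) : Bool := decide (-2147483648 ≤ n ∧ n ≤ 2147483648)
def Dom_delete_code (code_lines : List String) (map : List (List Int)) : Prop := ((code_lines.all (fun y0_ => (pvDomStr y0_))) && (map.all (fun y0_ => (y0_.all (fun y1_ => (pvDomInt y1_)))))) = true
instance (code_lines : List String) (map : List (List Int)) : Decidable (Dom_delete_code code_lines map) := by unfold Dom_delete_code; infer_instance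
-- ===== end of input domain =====

-- B replaces A's per-character scan of `map` with a dict index (line_id -> set of chr_ids)
-- built once, then overwrites only the indexed positions of each line (objective: faster).

-- ===== PORT A =====
def delete_code (code_lines : List String) (map : List (List Int)) : List String :=
  (List.range code_lines.length).foldl (fun acc line_id =>
    let lineChars := (code_lines.getD line_id "").toList
    let this_line := (List.range lineChars.length).foldl (fun (s : List Char) (chr_id : Nat) =>
      if [(line_id : Int), (chr_id : Int)] ∈ map then s ++ [' ']
      else s ++ [lineChars.getD chr_id ' ']) []
    acc ++ [String.ofList this_line]) []

-- ===== PORT B =====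
-- idx = {}; for e in map: if len(e) == 2: s = idx.get(e[0], set()); s.add(e[1]); idx[e[0]] = s
def buildIdx (map : List (List Int)) : PySem.Dict Int (List Int) :=
  map.foldl (fun d e =>
    if e.length = 2 then
      d.insert (e.getD 0 0) (PySem.Set.add (d.getD (e.getD 0 0) []) (e.getD 1 0))
    else d) PySem.Dict.empty

-- for c in idx.get(i, ()): if 0 <= c < len(chars): chars[c] = ' '
def blankLine (cs : List Int) (chars : List Char) : List Char :=
  cs.foldl (fun l c => if 0 ≤ c ∧ c < (l.length : Int) then l.set c.toNat ' ' else l) chars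

def delete_code_alt (code_lines : List String) (map : List (List Int)) : List String :=
  let idx := buildIdx map
  (PySem.List.enumerate code_lines 0).foldl (fun out p =>
    out ++ [String.ofList (blankLine (idx.getD p.1 []) p.2.toList)]) []

-- ===== PRECONDITION & SPEC =====
def Spec_delete_code (code_lines : List String) (map : List (List Int)) (out : List String) : Prop := out = delete_code_alt code_lines map
instance (code_lines : List String) (map : List (List Int)) (out : List String) : Decidable (Spec_delete_code code_lines map out) := by unfold Spec_delete_code; infer_instance

-- ===== CLAIM (what is proved, stated in full; the proofs are below) =====
def Claim_equal_delete_code : Prop := ∀ (code_lines : List String) (map : List (List Int)), Dom_delete_code code_lines map → Spec_delete_code code_lines map (delete_code code_lines map)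

-- ===== LEMMAS AND PROOFS =====

theorem length_blankLine (cs : List Int) (chars : List Char) :
    (blankLine cs chars).length = chars.length := by
  induction cs generalizing chars with
  | nil => rfl
  | cons c cs ih =>
    simp only [blankLine, List.foldl_cons] at *
    split_ifs <;> simp [ih]

theorem getD_blankLine (cs : List Int) (chars : List Char) (j : Nat) (hj : j < chars.length) :
    (blankLine cs chars).getD j ' ' = if (j : Int) ∈ cs then ' ' else chars.getD j ' ' := by
  induction cs generalizing chars with
  | nil => simp [blankLine]
  | cons c cs ih =>
    simp only [blankLine, List.foldl_cons] at *
    by_cases hc : 0 ≤ c ∧ c < (chars.length : Int)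
    · rw [if_pos hc]
      rw [ih (chars.set c.toNat ' ') (by simpa using hj)]
      by_cases hjc : (j : Int) = c
      · have hcj : c.toNat = j := by omega
        simp [hcj, hjc, List.getD_eq_getElem?_getD, hj]
      · have hne : c.toNat ≠ j := by omega
        simp [List.getD_eq_getElem?_getD, hne, List.mem_cons, hjc]
    · rw [if_neg hc]
      rw [ih chars hj]
      have hjc : (j : Int) ≠ c := by omega
      simp [List.mem_cons, hjc]

theorem pair_of_len_two (e : List Int) (h : e.length = 2) : e = [e.getD 0 0, e.getD 1 0] := by
  match e, h with
  | [a, b], _ => rfl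

theorem mem_buildIdx_aux (map : List (List Int)) (d : PySem.Dict Int (List Int)) (i j : Int) :
    j ∈ (map.foldl (fun d e =>
      if e.length = 2 then
        d.insert (e.getD 0 0) (PySem.Set.add (d.getD (e.getD 0 0) []) (e.getD 1 0))
      else d) d).getD i [] ↔ j ∈ d.getD i [] ∨ [i, j] ∈ map := by
  induction map generalizing d with
  | nil => simp
  | cons e rest ih =>
    simp only [List.foldl_cons]
    by_cases h2 : e.length = 2
    · rw [if_pos h2, ih]
      by_cases hi : i = e.getD 0 0
      · subst hi
        rw [PySem.Dict.getD_insert_self]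
        rw [PySem.Set.mem_add]
        constructor
        · rintro (⟨hm | hj⟩ | hr)
          · exact Or.inl hm
          · subst hj
            refine Or.inr (List.mem_cons.mpr (Or.inl ?_))
            exact (pair_of_len_two e h2).symm
          · exact Or.inr (List.mem_cons.mpr (Or.inr hr))
        · rintro (hm | hr)
          · exact Or.inl (Or.inl hm)
          · rcases List.mem_cons.mp hr with he | hr
            · have := pair_of_len_two e h2
              rw [this] at he
              have : j = e.getD 1 0 := by
                injection he.symm with h1 h2'
                injection h2' with h3 _
                exact h3.symm
              exact Or.inl (Or.inr this)
            · exact Or.inr hr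
      · rw [PySem.Dict.getD_insert_of_ne _ _ _ hi]
        constructor
        · rintro (hm | hr)
          · exact Or.inl hm
          · exact Or.inr (List.mem_cons.mpr (Or.inr hr))
        · rintro (hm | hr)
          · exact Or.inl hm
          · rcases List.mem_cons.mp hr with he | hr
            · exfalso
              apply hi
              have := pair_of_len_two e h2
              rw [this] at he
              injection he.symm with h1 _
              exact h1.symm
            · exact Or.inr hr
    · rw [if_neg h2, ih]
      constructor
      · rintro (hm | hr)
        · exact Or.inl hm
        · exact Or.inr (List.mem_cons.mpr (Or.inr hr))
      · rintro (hm | hr)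
        · exact Or.inl hm
        · rcases List.mem_cons.mp hr with he | hr
          · exfalso; apply h2; rw [← he]; rfl
          · exact Or.inr hr

theorem mem_buildIdx (map : List (List Int)) (i j : Int) :
    j ∈ (buildIdx map).getD i [] ↔ [i, j] ∈ map := by
  unfold buildIdx
  rw [mem_buildIdx_aux]
  simp [PySem.Dict.getD, PySem.Dict.empty, PySem.Dict.get?]

-- ===== VERDICT (by name: the statement is the Claim_ definition above) =====
theorem delete_code_spec : Claim_equal_delete_code := by
  intro code_lines map _
  unfold Spec_delete_code delete_code delete_code_alt
  have hinner : ∀ (line_id : Nat) (lineChars : List Char),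
      (List.range lineChars.length).foldl (fun (s : List Char) (chr_id : Nat) =>
        if [(line_id : Int), (chr_id : Int)] ∈ map then s ++ [' ']
        else s ++ [lineChars.getD chr_id ' ']) [] =
      (List.range lineChars.length).map (fun (chr_id : Nat) =>
        if [(line_id : Int), (chr_id : Int)] ∈ map then ' ' else lineChars.getD chr_id ' ') := by
    intro line_id lineChars
    have hfun : (fun (s : List Char) (chr_id : Nat) =>
        if [(line_id : Int), (chr_id : Int)] ∈ map then s ++ [' ']
        else s ++ [lineChars.getD chr_id ' ']) =
        fun (s : List Char) (chr_id : Nat) => s ++ [if [(line_id : Int), (chr_id : Int)] ∈ map then ' '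
          else lineChars.getD chr_id ' '] := by
      funext s chr_id; split_ifs <;> rfl
    rw [hfun, PySem.List.foldl_append_singleton_eq_map]
    rfl
  have hA : (List.range code_lines.length).foldl (fun acc line_id =>
      acc ++ [String.ofList ((List.range (code_lines.getD line_id "").toList.length).foldl
        (fun (s : List Char) (chr_id : Nat) => if [(line_id : Int), (chr_id : Int)] ∈ map then s ++ [' ']
          else s ++ [(code_lines.getD line_id "").toList.getD chr_id ' ']) [])]) [] =
      (List.range code_lines.length).map (fun line_id =>
        String.ofList ((List.range (code_lines.getD line_id "").toList.length).map
          (fun (chr_id : Nat) => if [(line_id : Int), (chr_id : Int)] ∈ map then ' '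
            else (code_lines.getD line_id "").toList.getD chr_id ' '))) := by
    rw [PySem.List.foldl_append_singleton_eq_map
      (fun line_id => String.ofList ((List.range (code_lines.getD line_id "").toList.length).foldl
        (fun (s : List Char) (chr_id : Nat) => if [(line_id : Int), (chr_id : Int)] ∈ map then s ++ [' ']
          else s ++ [(code_lines.getD line_id "").toList.getD chr_id ' ']) []))]
    simp only [List.nil_append]
    apply List.map_congr_left
    intro line_id _
    rw [hinner]
  have hB : (PySem.List.enumerate code_lines 0).foldl (fun out p =>
      out ++ [String.ofList (blankLine ((buildIdx map).getD p.1 []) p.2.toList)]) [] =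
      (PySem.List.enumerate code_lines 0).map (fun p =>
        String.ofList (blankLine ((buildIdx map).getD p.1 []) p.2.toList)) := by
    rw [PySem.List.foldl_append_singleton_eq_map
      (fun p : Int × String => String.ofList (blankLine ((buildIdx map).getD p.1 []) p.2.toList))]
    rfl
  simp only [hA, hB]
  apply List.ext_getElem
  · simp [PySem.List.length_enumerate]
  · intro k hk1 hk2
    simp only [List.getElem_map, List.getElem_range]
    have hkL : k < code_lines.length := by simpa using hk1
    rw [PySem.List.getElem_enumerate code_lines 0 k (by simpa [PySem.List.length_enumerate] using hkL)]
    simp only [zero_add]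
    have hgetD : code_lines.getD k "" = code_lines[k] := List.getD_eq_getElem _ _ hkL
    rw [hgetD]
    congr 1
    apply List.ext_getElem
    · simp [length_blankLine]
    · intro j hj1 hj2
      have hjn : j < code_lines[k].toList.length := by simpa using hj1
      rw [List.getElem_map, List.getElem_range]
      have hlen : j < (blankLine ((buildIdx map).getD (k:Int) []) code_lines[k].toList).length := by
        rw [length_blankLine]; exact hjn
      rw [← List.getD_eq_getElem _ ' ' hlen]
      rw [getD_blankLine _ _ j hjn]
      simp [mem_buildIdx]
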